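-- pv_equiv track=rewrite | github.com/ielab/caselaw-repro | vector-similarity/main.py | to_id
-- ===== SOURCE A (Python) =====
-- def to_id(t: str) -> str:
--         if '-' in t:
--                 parts = t.split('-', -1)
--         else:
--             parts = []
--             start = 0
--             curr = True
--             t_len = len(t)
--             for i in range(t_len):
--                     past = curr
--                     if t[i].isdigit():
--                         curr = True
--                     else:
--                         curr = False
--
--                     if past != curr:
--                         parts.append(t[start:i])
--                         start = i
--
--                     if i+1 == t_len:
--                         parts.append(t[start:])
--
--         for i in range(len(parts)):
--                 if parts[i].isdigit():
--                         parts[i] = str(int(parts[i]))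
--
--         return ''.join(parts)
-- ===== SOURCE B (Python) =====
-- def to_id(t: str) -> str:
--     if '-' in t:
--         parts = t.split('-')
--     else:
--         # group consecutive characters by digit-ness (groupby-style accumulation)
--         groups = []
--         for ch in t:
--             if groups and groups[-1][0].isdigit() == ch.isdigit():
--                 groups[-1].append(ch)
--             else:
--                 groups.append([ch])
--         parts = [''.join(g) for g in groups]
--     return ''.join(str(int(p)) if p.isdigit() else p for p in parts)
-- ===== Notes on version B (the rewrite author's own statement) =====
-- stated objective: simpler
-- what changed: The manual index/start/curr/past boundary-tracking state machine with slicing is replaced by a groupby-style single pass that appends each character to the last group when its digit-ness matches, and the two normalization sites are folded into one shared join over normalized parts.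
import Mathlib
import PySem

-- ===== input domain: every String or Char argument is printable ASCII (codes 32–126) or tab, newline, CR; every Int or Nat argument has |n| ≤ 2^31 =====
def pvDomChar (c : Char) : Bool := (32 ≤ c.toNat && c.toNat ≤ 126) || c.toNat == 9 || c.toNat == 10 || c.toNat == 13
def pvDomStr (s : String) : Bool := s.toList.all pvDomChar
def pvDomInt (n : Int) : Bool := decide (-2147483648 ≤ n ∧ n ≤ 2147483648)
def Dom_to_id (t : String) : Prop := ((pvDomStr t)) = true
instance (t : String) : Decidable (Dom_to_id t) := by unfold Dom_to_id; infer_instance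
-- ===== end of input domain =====

-- B replaces A's index/start/curr boundary-tracking state machine by a groupby-style
-- accumulation into the last group (objective: simpler); return values agree everywhere.

-- ===== PORT A =====
-- shared normalization step, literally `str(int(p)) if p.isdigit() else p` (both Pythons
-- contain it verbatim); `int()` cannot raise on a nonempty all-digit string, so the
-- `none` branch is unreachable and returns p unchanged
def toIdNormPart (p : List Char) : List Char :=
  if PySem.Chars.strIsdigit p then
    match PySem.Int.ofChars? p with
    | some n => PySem.Int.toChars n
    | none => p
  else p

-- the `for i in range(t_len)` loop of A, with the same state (parts, start, curr)
def toIdLoop (cs : List Char) (i : Nat) (parts : List (List Char)) (start : Nat)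
    (curr : Bool) : List (List Char) :=
  if h : i < cs.length then
    let past := curr
    let curr' := PySem.Chars.isdigit cs[i]
    let ps := if past ≠ curr' then
        parts ++ [PySem.List.slice cs (some (start : Int)) (some (i : Int))] else parts
    let start' := if past ≠ curr' then i else start
    let ps' := if i + 1 = cs.length then
        ps ++ [PySem.List.slice cs (some (start' : Int)) none] else ps
    toIdLoop cs (i + 1) ps' start' curr'
  else parts
termination_by cs.length - i

def to_id (t : String) : String :=
  let cs := t.toList
  let parts :=
    if PySem.Chars.isIn ['-'] cs then PySem.Chars.splitOnMax cs ['-'] (-1)  -- t.split('-', -1)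
    else toIdLoop cs 0 [] 0 true
  -- `for i in range(len(parts)): parts[i] = str(int(parts[i])) if digit` rewrites each
  -- entry in place, i.e. maps toIdNormPart over parts
  String.ofList (PySem.Chars.join [] (parts.map toIdNormPart))

-- ===== PORT B =====
-- one step of B's grouping loop: append ch to the last group if it has the same
-- digit-ness as that group's first character, else start a new group
def toIdStep (groups : List (List Char)) (ch : Char) : List (List Char) :=
  match groups.getLast? with
  | some g =>
      if PySem.Chars.isdigit g.headI = PySem.Chars.isdigit ch then
        groups.dropLast ++ [g ++ [ch]]
      else groups ++ [[ch]]
  | none => groups ++ [[ch]]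

def to_id_alt (t : String) : String :=
  let parts :=
    if PySem.Chars.isIn ['-'] t.toList then PySem.Chars.splitOn t.toList ['-']  -- t.split('-')
    else t.toList.foldl toIdStep []   -- ''.join(g) of a char-list group is the group itself
  String.ofList (PySem.Chars.join [] (parts.map toIdNormPart))

-- ===== PRECONDITION & SPEC =====
def Spec_to_id (t : String) (out : String) : Prop := out = to_id_alt t
instance (t : String) (out : String) : Decidable (Spec_to_id t out) := by unfold Spec_to_id; infer_instance

-- ===== CLAIM (what is proved, stated in full; the proofs are below) =====
def Claim_equal_to_id : Prop := ∀ (t : String), Dom_to_id t → Spec_to_id t (to_id t)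

-- ===== LEMMAS AND PROOFS =====

-- reference segmentation both loops compute: pending run, its class, remaining input
def segGo (pending : List Char) (curr : Bool) : List Char → List (List Char)
  | [] => [pending]
  | c :: rest =>
      if PySem.Chars.isdigit c = curr then segGo (pending ++ [c]) curr rest
      else pending :: segGo [c] (PySem.Chars.isdigit c) rest

theorem take_succ_drop (cs : List Char) (start i : Nat) (hs : start ≤ i) (hi : i < cs.length) :
    (cs.take (i + 1)).drop start = (cs.take i).drop start ++ [cs[i]] := by
  rw [List.take_add_one, List.getElem?_eq_getElem hi]
  rw [List.drop_append_of_le_length (by simp; omega)]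
  simp

theorem toIdLoop_eq (cs : List Char) :
    ∀ k i parts start curr, cs.length - i ≤ k → start ≤ i → i < cs.length →
    toIdLoop cs i parts start curr
      = parts ++ segGo ((cs.take i).drop start) curr (cs.drop i) := by
  intro k
  induction k with
  | zero => intro i _ _ _ hk _ hi; omega
  | succ k ih =>
    intro i parts start curr hk hs hi
    rw [toIdLoop, dif_pos hi]
    have hdrop : cs.drop i = cs[i] :: cs.drop (i + 1) := List.drop_eq_getElem_cons hi
    have hslice : PySem.List.slice cs (some (start : Int)) (some (i : Int))
        = (cs.take i).drop start := by
      rw [PySem.List.slice_natCast, List.drop_take]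
    by_cases hc : PySem.Chars.isdigit cs[i] = curr
    · -- class unchanged: no flush
      simp only [hc, ne_eq, not_true_eq_false, if_neg, not_false_eq_true]
      by_cases hlast : i + 1 = cs.length
      · rw [if_pos hlast, toIdLoop, dif_neg (by omega)]
        rw [hdrop]
        rw [segGo, if_pos hc, show cs.drop (i+1) = [] from by
          simp [List.drop_eq_nil_iff]; omega]
        rw [segGo]
        rw [PySem.List.slice_from_natCast]
        have : cs.drop start = (cs.take (i+1)).drop start := by
          rw [show cs.take (i+1) = cs from List.take_of_length_le (by omega)]
        rw [this, take_succ_drop cs start i hs hi]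
      · rw [if_neg hlast]
        rw [ih (i+1) parts start curr (by omega) (by omega) (by omega)]
        rw [hdrop, segGo, if_pos hc, take_succ_drop cs start i hs hi]
    · -- class changed: flush pending, start := i
      have hcc : ¬curr = PySem.Chars.isdigit cs[i] := fun h => hc h.symm
      simp only [ne_eq, hcc, not_false_eq_true, if_true]
      by_cases hlast : i + 1 = cs.length
      · rw [if_pos hlast, toIdLoop, dif_neg (by omega)]
        rw [hdrop, segGo, if_neg hc]
        rw [show cs.drop (i+1) = [] from by simp; omega]
        rw [segGo, hslice, PySem.List.slice_from_natCast]
        rw [show cs.drop i = [cs[i]] from by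
          rw [hdrop, show cs.drop (i+1) = [] from by simp; omega]]
        simp
      · rw [if_neg hlast]
        rw [ih (i+1) (parts ++ [PySem.List.slice cs (some (start:Int)) (some (i:Int))]) i
              (PySem.Chars.isdigit cs[i]) (by omega) (by omega) (by omega)]
        rw [hdrop, segGo, if_neg hc, hslice]
        rw [take_succ_drop cs i i le_rfl hi]
        simp [List.drop_take]

theorem headI_append_singleton (g : List Char) (c : Char) (hg : g ≠ []) :
    (g ++ [c]).headI = g.headI := by
  cases g with
  | nil => exact absurd rfl hg
  | cons x xs => rfl

theorem foldl_toIdStep_eq :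
    ∀ (rest : List Char) (parts : List (List Char)) (g : List Char), g ≠ [] →
    List.foldl toIdStep (parts ++ [g]) rest
      = parts ++ segGo g (PySem.Chars.isdigit g.headI) rest := by
  intro rest
  induction rest with
  | nil => intro parts g _; simp [segGo]
  | cons c rest ih =>
    intro parts g hg
    rw [List.foldl_cons]
    have hstep : toIdStep (parts ++ [g]) c =
        if PySem.Chars.isdigit g.headI = PySem.Chars.isdigit c
        then parts ++ [g ++ [c]] else (parts ++ [g]) ++ [[c]] := by
      rw [toIdStep]
      simp
    by_cases hc : PySem.Chars.isdigit c = PySem.Chars.isdigit g.headI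
    · rw [hstep, if_pos hc.symm]
      rw [ih parts (g ++ [c]) (by simp)]
      rw [headI_append_singleton g c hg]
      rw [segGo, if_pos hc]
    · rw [hstep, if_neg (fun h => hc h.symm)]
      rw [ih (parts ++ [g]) [c] (by simp)]
      rw [segGo, if_neg hc]
      simp [List.headI]
-- join with empty separator ignores an empty part in front
theorem join_nil_cons_nil (l : List (List Char)) :
    PySem.Chars.join [] (([] : List Char) :: l) = PySem.Chars.join [] l := by
  cases l with
  | nil => rfl
  | cons x xs => rw [PySem.Chars.join_cons_cons]; simp

theorem toIdNormPart_nil : toIdNormPart [] = [] := rfl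

theorem splitOnMax_neg_one (cs : List Char) :
    PySem.Chars.splitOnMax cs ['-'] (-1) = PySem.Chars.splitOn cs ['-'] := rfl

-- ===== VERDICT (by name: the statement is the Claim_ definition above) =====
theorem to_id_spec : Claim_equal_to_id := by
  intro t _
  unfold Spec_to_id to_id to_id_alt
  by_cases hd : PySem.Chars.isIn ['-'] t.toList = true
  · simp only [hd, if_true, splitOnMax_neg_one]
  · simp only [Bool.not_eq_true] at hd
    simp only [hd, Bool.false_eq_true, if_false]
    cases hcs : t.toList with
    | nil =>
      rw [show toIdLoop [] 0 [] 0 true = [] from by rw [toIdLoop]; simp]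
      rfl
    | cons c rest =>
      have hA : toIdLoop (c :: rest) 0 [] 0 true
          = segGo [] true (c :: rest) := by
        have := toIdLoop_eq (c :: rest) (c :: rest).length 0 [] 0 true
          (by omega) (by omega) (by simp)
        simpa using this
      have hB : List.foldl toIdStep [] (c :: rest)
          = segGo [c] (PySem.Chars.isdigit c) rest := by
        rw [List.foldl_cons, show toIdStep [] c = [] ++ [[c]] from rfl]
        rw [foldl_toIdStep_eq rest [] [c] (by simp)]
        rfl
      rw [hA, hB, segGo]
      by_cases hc : PySem.Chars.isdigit c = true
      · rw [if_pos hc, hc]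
        rfl
      · simp only [Bool.not_eq_true] at hc
        rw [if_neg (by simp [hc]), hc]
        rw [List.map_cons, toIdNormPart_nil, join_nil_cons_nil]
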